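-- pv_equiv track=rewrite | github.com/ErikPoppleton/oat_benchmark | functions.py | find_all_greedy
-- ===== SOURCE A (Python) =====
-- def find_all_greedy(data, substr):
--     start = 0
--     idxs = []
--     while True:
--         start = data.find(substr, start)
--         if start == -1: return idxs
--         idxs.append(start)
--         if len(idxs) > 2:
--             start += int((idxs[-1] - idxs[-2])/2)
--         else:
--             start += len(substr)
-- ===== SOURCE B (Python) =====
-- def find_all_greedy(data, substr):
--     # Build the table of all (overlapping) occurrence positions once,
--     # then replay the greedy stride as a single pointer walk over it.
--     L = len(substr)
--     occ = [i for i in range(len(data) - L + 1) if data[i:i+L] == substr]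
--     idxs = []
--     start = 0
--     for o in occ:
--         if o < start:
--             continue
--         idxs.append(o)
--         if len(idxs) > 2:
--             start = o + int((idxs[-1] - idxs[-2]) / 2)
--         else:
--             start = o + L
--     return idxs
-- ===== Notes on version B (the rewrite author's own statement) =====
-- stated objective: alternative
-- what changed: B precomputes the full table of all (overlapping) occurrence positions in one scan and replays the greedy stride as a single pointer walk over that table, instead of A's repeated data.find(substr, start) searches driven by the loop state.
-- outside the precondition, e.g. on find_all_greedy('aaa', 'a'): A does not finish within the time limit, B returns [0, 1, 2]; on find_all_greedy('', ''): A does not finish within the time limit, B returns [0]; on find_all_greedy('abcdaefgaa', 'a'): A returns [0, 4, 8], B returns [0, 4, 8]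
import Mathlib
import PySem

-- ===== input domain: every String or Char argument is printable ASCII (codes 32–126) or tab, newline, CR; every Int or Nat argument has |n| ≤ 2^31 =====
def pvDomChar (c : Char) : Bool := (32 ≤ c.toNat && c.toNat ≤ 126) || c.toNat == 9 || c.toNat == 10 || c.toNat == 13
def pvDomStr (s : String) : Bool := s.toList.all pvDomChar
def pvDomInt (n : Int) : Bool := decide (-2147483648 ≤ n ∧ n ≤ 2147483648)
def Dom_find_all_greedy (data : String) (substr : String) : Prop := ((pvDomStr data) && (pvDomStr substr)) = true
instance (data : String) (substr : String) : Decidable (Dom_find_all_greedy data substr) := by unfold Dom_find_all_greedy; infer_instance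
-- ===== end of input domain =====

-- B replaces A's repeated data.find(substr, start) searches by ONE precomputed table of all
-- (overlapping) occurrence positions plus a single pointer walk over it (objective: alternative).

-- ===== PORT A =====
-- A's `while True` loop, transliterated as recursion on a fuel counter; |data|+2 iterations
-- dominate every terminating run of the Python loop (each iteration strictly increases `start`,
-- which stays ≤ len(data) while a match is found); on inputs admitted by Pre_ the fuel is never
-- exhausted (proved below).  `rev` holds `idxs` in reverse, so idxs[-1]/idxs[-2] are rev[0]/rev[1];
-- int((idxs[-1]-idxs[-2])/2) is exact truncating division: PySem.Int.truncdiv.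
def pvLoopA (data substr : String) : Nat → Int → List Int → List Int
  | 0, _, rev => rev.reverse
  | fuel+1, start, rev =>
    let s := PySem.Str.findFrom data substr start          -- start = data.find(substr, start)
    if s = -1 then rev.reverse                             -- if start == -1: return idxs
    else
      let rev' := s :: rev                                 -- idxs.append(start)
      let start' := if 2 < rev'.length                     -- if len(idxs) > 2:
        then s + PySem.Int.truncdiv (s - rev'.getD 1 0) 2  --   start += int((idxs[-1]-idxs[-2])/2)
        else s + PySem.Str.len substr                      -- else: start += len(substr)
      pvLoopA data substr fuel start' rev'

def find_all_greedy (data : String) (substr : String) : List Int :=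
  pvLoopA data substr (data.toList.length + 2) 0 []

-- ===== PORT B =====
-- occ = [i for i in range(len(data) - L + 1) if data[i:i+L] == substr]
def pvOcc (data substr : String) : List Int :=
  (PySem.List.pyRange 0 (PySem.Str.len data - PySem.Str.len substr + 1) 1).filter
    (fun i => PySem.Str.slice data (some i) (some (i + PySem.Str.len substr)) == substr)

-- the `for o in occ` pointer walk of Source B (rev holds idxs reversed, as in port A)
def pvWalkB (L : Int) : List Int → Int → List Int → List Int
  | [], _, rev => rev.reverse
  | o :: rest, start, rev =>
    if o < start then pvWalkB L rest start rev             -- if o < start: continue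
    else
      let rev' := o :: rev                                 -- idxs.append(o)
      let start' := if 2 < rev'.length
        then o + PySem.Int.truncdiv (o - rev'.getD 1 0) 2
        else o + L
      pvWalkB L rest start' rev'

def find_all_greedy_alt (data : String) (substr : String) : List Int :=
  pvWalkB (PySem.Str.len substr) (pvOcc data substr) 0 []

-- ===== PRECONDITION & SPEC =====
-- Pre_ excludes exactly a closed-form over-approximation of the inputs on which Python A LOOPS
-- FOREVER (it returns no value there): the empty substring (find always succeeds with stride 0),
-- and inputs where substr occurs at two ADJACENT positions i, i+1 with i at least len(substr)
-- beyond the first occurrence — there the greedy walk can reach stride int(1/2)=0 and A re-finds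
-- the same index forever (e.g. ("aaa","a")).  The condition is slightly conservative: on the rare
-- such inputs where A does still return (e.g. ("abcdaefgaa","a") → [0,4,8], the walk jumping over
-- the adjacent pair) B returns the same value, see claim.json "cites".
def Pre_find_all_greedy (data : String) (substr : String) : Prop :=
  substr ≠ "" ∧ ∀ i ∈ List.range data.toList.length, ∀ j ∈ List.range data.toList.length,
    substr.toList <+: data.toList.drop i → substr.toList <+: data.toList.drop (i+1) →
    substr.toList <+: data.toList.drop j →
    (i : Int) < (j : Int) + substr.toList.length
instance (data : String) (substr : String) : Decidable (Pre_find_all_greedy data substr) := by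
  unfold Pre_find_all_greedy; infer_instance

def pvWitness_find_all_greedy : String × String := ("abcabc", "abc")

def Spec_find_all_greedy (data : String) (substr : String) (out : List Int) : Prop := out = find_all_greedy_alt data substr
instance (data : String) (substr : String) (out : List Int) : Decidable (Spec_find_all_greedy data substr out) := by unfold Spec_find_all_greedy; infer_instance

-- ===== CLAIM (what is proved, stated in full; the proofs are below) =====
def Claim_equal_find_all_greedy : Prop := ∀ (data : String) (substr : String), Dom_find_all_greedy data substr → Pre_find_all_greedy data substr → Spec_find_all_greedy data substr (find_all_greedy data substr)

-- ===== LEMMAS AND PROOFS =====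

-- data[i:i+L] == substr tests exactly "substr occurs at position i"
lemma pv_match_iff (data substr : String) (i : Int) (hi : 0 ≤ i) :
    ((PySem.Str.slice data (some i) (some (i + PySem.Str.len substr)) == substr) = true
      ↔ substr.toList <+: data.toList.drop i.toNat) := by
  have hL : PySem.Str.len substr = (substr.toList.length : Int) := PySem.Str.len_eq substr
  rw [beq_iff_eq, ← String.toList_inj, PySem.Str.toList_slice, PySem.Chars.slice_eq_listSlice,
    PySem.List.slice_toNat data.toList hi (by omega), List.prefix_iff_eq_take]
  have h : (i + PySem.Str.len substr).toNat - i.toNat = substr.toList.length := by omega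
  rw [h]
  exact ⟨fun h => h.symm, fun h => h.symm⟩

-- membership in the occurrence table
lemma pv_mem_occ (data substr : String) (x : Int) :
    x ∈ pvOcc data substr ↔
      0 ≤ x ∧ x < (data.toList.length : Int) - substr.toList.length + 1
        ∧ substr.toList <+: data.toList.drop x.toNat := by
  unfold pvOcc
  rw [List.mem_filter, PySem.List.mem_pyRange_one, PySem.Str.len_eq, PySem.Str.len_eq]
  constructor
  · rintro ⟨⟨h0, h1⟩, h2⟩
    exact ⟨h0, by omega, (pv_match_iff data substr x h0).mp h2⟩
  · rintro ⟨h0, h1, h2⟩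
    exact ⟨⟨h0, by omega⟩, (pv_match_iff data substr x h0).mpr h2⟩

-- every occurrence position of a nonempty substr is in the table
lemma pv_occ_of_prefix (data substr : String) (ht : substr.toList ≠ []) (j : Nat)
    (h : substr.toList <+: data.toList.drop j) : (j : Int) ∈ pvOcc data substr := by
  have hlen := h.length_le
  rw [List.length_drop] at hlen
  have ht' : 0 < substr.toList.length := List.length_pos_iff.mpr ht
  rw [pv_mem_occ]
  refine ⟨by omega, by omega, by simpa using h⟩

-- the table is strictly increasing
lemma pv_occ_sorted (data substr : String) : List.Pairwise (· < ·) (pvOcc data substr) :=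
  List.Pairwise.filter _ (PySem.List.pairwise_lt_pyRange_one _ _)

-- under Pre_, an occurrence that lies at least len(substr) past some occurrence j is never
-- immediately followed by another occurrence: the gap to the next one is at least 2
lemma pv_occ_gap (data substr : String) (hpre : Pre_find_all_greedy data substr)
    {p o j : Int} (hp : p ∈ pvOcc data substr) (ho : o ∈ pvOcc data substr)
    (hj : j ∈ pvOcc data substr) (hjp : j + (substr.toList.length : Int) ≤ p)
    (hpo : p < o) : p + 2 ≤ o := by
  rw [pv_mem_occ] at hp ho hj
  obtain ⟨hp0, hp1, hp2⟩ := hp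
  obtain ⟨ho0, ho1, ho2⟩ := ho
  obtain ⟨hj0, hj1, hj2⟩ := hj
  by_contra hcon
  have hoe : o = p + 1 := by omega
  have ht' : 0 < substr.toList.length :=
    List.length_pos_iff.mpr (fun hnil => hpre.1 (String.toList_eq_nil_iff.mp hnil))
  have hplt : p.toNat < data.toList.length := by
    have := hp2.length_le
    rw [List.length_drop] at this
    omega
  have hjlt : j.toNat < data.toList.length := by
    have := hj2.length_le
    rw [List.length_drop] at this
    omega
  have hon : o.toNat = p.toNat + 1 := by omega
  have := hpre.2 p.toNat (List.mem_range.mpr hplt) j.toNat (List.mem_range.mpr hjlt)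
    hp2 (by rw [← hon]; exact ho2) hj2
  omega

-- find(substr, start) = -1 when start points past the end of data
lemma pv_findFrom_past (data substr : String) (start : Int)
    (h : (data.toList.length : Int) < start) : PySem.Str.findFrom data substr start = -1 := by
  rw [PySem.Str.findFrom_eq]
  unfold PySem.Chars.findFrom
  have h0 : ¬ start < 0 := by omega
  simp only [h0, if_false, if_pos h]

-- find(substr, start) = -1 when no occurrence lies at or after start
lemma pv_findFrom_none (data substr : String) (start : Int) (h0 : 0 ≤ start)
    (h : ∀ j : Nat, start ≤ (j : Int) → ¬ substr.toList <+: data.toList.drop j) :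
    PySem.Str.findFrom data substr start = -1 := by
  by_cases hle : start ≤ (data.toList.length : Int)
  · have hcast : ((start.toNat : Nat) : Int) = start := by omega
    rw [← hcast, PySem.Str.findFrom_eq,
      PySem.Chars.findFrom_natCast_eq_neg_one_iff _ _ _ (by omega)]
    intro hinf
    rw [← PySem.Chars.isIn_iff_infix, ← PySem.Chars.exists_prefix_drop_iff_isIn] at hinf
    obtain ⟨j, hj⟩ := hinf
    rw [List.drop_drop] at hj
    exact h (start.toNat + j) (by omega) hj
  · exact pv_findFrom_past data substr start (by omega)

-- find(substr, start) returns the first occurrence o at or after start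
lemma pv_findFrom_first (data substr : String) (start o : Int) (h0 : 0 ≤ start)
    (ho : o ∈ pvOcc data substr) (hso : start ≤ o)
    (hmin : ∀ j : Nat, start ≤ (j : Int) → (j : Int) < o → ¬ substr.toList <+: data.toList.drop j) :
    PySem.Str.findFrom data substr start = o := by
  rw [pv_mem_occ] at ho
  obtain ⟨ho0, ho1, ho2⟩ := ho
  have hk : start.toNat ≤ data.toList.length := by omega
  have hcast : ((start.toNat : Nat) : Int) = start := by omega
  rw [PySem.Str.findFrom_eq, ← hcast]
  have hne : PySem.Chars.findFrom data.toList substr.toList (start.toNat : Int) ≠ -1 := by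
    intro hEq
    rw [PySem.Chars.findFrom_natCast_eq_neg_one_iff _ _ _ hk] at hEq
    have hni := hEq
    apply hni
    rw [← PySem.Chars.isIn_iff_infix, ← PySem.Chars.exists_prefix_drop_iff_isIn]
    exact ⟨o.toNat - start.toNat, by rw [List.drop_drop]; convert ho2 using 2; omega⟩
  obtain ⟨hge, hpref, hmin'⟩ := PySem.Chars.findFrom_natCast_spec _ _ _ hk hne
  set r := PySem.Chars.findFrom data.toList substr.toList (start.toNat : Int) with hr
  have hrnn : 0 ≤ r := le_trans (by omega) hge
  have h1 : ¬ r.toNat < o.toNat := fun hlt =>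
    hmin r.toNat (by omega) (by omega) hpref
  have h2 : ¬ o.toNat < r.toNat := fun hlt =>
    hmin' o.toNat (by omega) hlt ho2
  omega

-- the stride is at least 1 whenever the gap is at least 2
lemma pv_stride_pos {d : Int} (h : 2 ≤ d) : 1 ≤ PySem.Int.truncdiv d 2 := by
  unfold PySem.Int.truncdiv
  rw [Int.tdiv_eq_ediv_of_nonneg (by omega)]
  omega

-- the main loop correspondence: A's find-loop equals B's pointer walk on the table suffix.
-- Invariants: pref are the table entries already passed (all < start); rev holds the picks so far
-- (all occurrences < start); if exactly one pick was made, start is at least pick + len(substr);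
-- if at least two picks were made, the newest pick lies at least len(substr) past some occurrence
-- (so by pv_occ_gap, under Pre_, every later gap is ≥ 2 and the stride stays positive).
lemma pv_main (data substr : String) (hpre : Pre_find_all_greedy data substr) :
    ∀ (suffix : List Int), ∀ (pref rev : List Int) (start : Int) (fuel : Nat),
      pvOcc data substr = pref ++ suffix →
      (∀ x ∈ pref, x < start) →
      (∀ x ∈ rev, x < start ∧ x ∈ pvOcc data substr) →
      (rev.length = 1 → rev.getD 0 0 + PySem.Str.len substr ≤ start) →
      (2 ≤ rev.length → ∃ j ∈ pvOcc data substr, j + PySem.Str.len substr ≤ rev.getD 0 0) →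
      0 ≤ start →
      suffix.length < fuel →
      pvLoopA data substr fuel start rev = pvWalkB (PySem.Str.len substr) suffix start rev := by
  have ht : substr.toList ≠ [] := fun hnil => hpre.1 (String.toList_eq_nil_iff.mp hnil)
  have htL : 1 ≤ PySem.Str.len substr := by
    rw [PySem.Str.len_eq]
    have := List.length_pos_iff.mpr ht
    omega
  have hLcast : PySem.Str.len substr = (substr.toList.length : Int) := PySem.Str.len_eq substr
  intro suffix
  induction suffix with
  | nil =>
    intro pref rev start fuel hocc hpref hrev h1v h2v h0 hfuel
    obtain ⟨fuel, rfl⟩ : ∃ f, fuel = f + 1 := ⟨fuel - 1, by omega⟩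
    have hfind : PySem.Str.findFrom data substr start = -1 := by
      apply pv_findFrom_none data substr start h0
      intro j hj hpre'
      have hmem : (j : Int) ∈ pvOcc data substr := pv_occ_of_prefix data substr ht j hpre'
      rw [hocc, List.append_nil] at hmem
      exact absurd (hpref _ hmem) (by omega)
    rw [PySem.Str.findFrom_eq] at hfind
    simp [pvLoopA, pvWalkB, hfind]
  | cons o rest ih =>
    intro pref rev start fuel hocc hpref hrev h1v h2v h0 hfuel
    obtain ⟨fuel, rfl⟩ : ∃ f, fuel = f + 1 := ⟨fuel - 1, by omega⟩
    have hsorted := pv_occ_sorted data substr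
    rw [hocc] at hsorted
    have homem : o ∈ pvOcc data substr := by rw [hocc]; simp
    by_cases hos : o < start
    · -- pointer skip: o is below start, A's find never sees it
      rw [show pvWalkB (PySem.Str.len substr) (o :: rest) start rev
            = pvWalkB (PySem.Str.len substr) rest start rev by simp [pvWalkB, hos]]
      exact ih (pref ++ [o]) rev start (fuel + 1)
        (by rw [hocc, List.append_assoc]; rfl)
        (by intro x hx
            rcases List.mem_append.mp hx with h | h
            · exact hpref x h
            · simp at h; omega)
        hrev h1v h2v h0 (by simp at hfuel ⊢; omega)
    · rw [not_lt] at hos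
      -- A's find returns exactly o
      have hfind : PySem.Str.findFrom data substr start = o := by
        apply pv_findFrom_first data substr start o h0 homem hos
        intro j hj hjo hpre'
        have hmem : (j : Int) ∈ pvOcc data substr := pv_occ_of_prefix data substr ht j hpre'
        rw [hocc] at hmem
        rcases List.mem_append.mp hmem with h | h
        · exact absurd (hpref _ h) (by omega)
        · rcases List.mem_cons.mp h with h | h
          · omega
          · have : o < (j : Int) :=
              (List.pairwise_cons.mp (List.pairwise_append.mp hsorted).2.1).1 _ h
            omega
      have hone : o ≥ 0 := by
        rw [pv_mem_occ] at homem; exact homem.1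
      -- both sides append o and compute the same new start'
      set start' := (if 2 < (o :: rev).length
          then o + PySem.Int.truncdiv (o - (o :: rev).getD 1 0) 2
          else o + PySem.Str.len substr) with hst'
      -- the new start is strictly past o
      have hlt : o + 1 ≤ start' := by
        rw [hst']
        by_cases hlen : 2 < (o :: rev).length
        · rw [if_pos hlen]
          obtain ⟨p, rev', rfl⟩ : ∃ p rev', rev = p :: rev' := by
            cases rev with
            | nil => simp at hlen
            | cons p rev' => exact ⟨p, rev', rfl⟩
          obtain ⟨j, hjmem, hjle⟩ := h2v (by simp at hlen ⊢; omega)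
          simp only [List.getD_cons_zero] at hjle
          have hp := hrev p (by simp)
          have hgap : p + 2 ≤ o :=
            pv_occ_gap data substr hpre hp.2 homem hjmem (by omega) (by omega)
          have := pv_stride_pos (d := o - p) (by omega)
          simp only [List.getD_cons_succ, List.getD_cons_zero]
          omega
        · rw [if_neg hlen]
          omega
      rw [show pvLoopA data substr (fuel + 1) start rev
            = pvLoopA data substr fuel start' (o :: rev) by
              simp only [pvLoopA, hfind, hst']
              rw [if_neg (by omega)],
          show pvWalkB (PySem.Str.len substr) (o :: rest) start rev
            = pvWalkB (PySem.Str.len substr) rest start' (o :: rev) by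
              simp only [pvWalkB, hst']
              rw [if_neg (by omega)]]
      refine ih (pref ++ [o]) (o :: rev) start' fuel
        (by rw [hocc, List.append_assoc]; rfl)
        (by intro x hx
            rcases List.mem_append.mp hx with h | h
            · exact lt_of_lt_of_le (lt_of_lt_of_le (hpref x h) hos) (by omega)
            · simp at h; omega)
        (by intro x hx
            rcases List.mem_cons.mp hx with h | h
            · exact ⟨by omega, by rw [h]; exact homem⟩
            · have := hrev x h
              exact ⟨by omega, this.2⟩)
        ?_ ?_ (by omega) (by simp at hfuel ⊢; omega)
      · -- one pick so far: rev = [], start' = o + len(substr)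
        intro hlen1
        have hrevnil : rev = [] := by
          cases rev with
          | nil => rfl
          | cons a l => simp at hlen1
        subst hrevnil
        rw [hst']
        simp
      · -- at least two picks: the newest pick o lies ≥ len(substr) past some occurrence
        intro hlen2
        obtain ⟨p, rev', rfl⟩ : ∃ p rev', rev = p :: rev' := by
          cases rev with
          | nil => simp at hlen2
          | cons p rev' => exact ⟨p, rev', rfl⟩
        simp only [List.getD_cons_zero]
        cases rev' with
        | nil =>
          -- two picks: p was the single pick, so start ≥ p + len(substr), and o ≥ start
          refine ⟨p, (hrev p (by simp)).2, ?_⟩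
          have := h1v rfl
          simp only [List.getD_cons_zero] at this
          omega
        | cons q rev'' =>
          -- three or more picks: inherit the witness from h2v (j + L ≤ p < o)
          obtain ⟨j, hjmem, hjle⟩ := h2v (by simp)
          simp only [List.getD_cons_zero] at hjle
          have hp := hrev p (by simp)
          exact ⟨j, hjmem, by omega⟩

-- ===== VERDICT (by name: the statement is the Claim_ definition above) =====
theorem find_all_greedy_spec : Claim_equal_find_all_greedy := by
  intro data substr _ hpre
  unfold Spec_find_all_greedy find_all_greedy find_all_greedy_alt
  apply pv_main data substr hpre (pvOcc data substr) [] [] 0 _ rfl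
  · intro x hx; cases hx
  · intro x hx; cases hx
  · intro h; simp at h
  · intro h; simp at h
  · exact le_refl 0
  · have h1 : (pvOcc data substr).length
        ≤ (PySem.List.pyRange 0 (PySem.Str.len data - PySem.Str.len substr + 1) 1).length :=
      List.length_filter_le _ _
    rw [PySem.List.length_pyRange_one, PySem.Str.len_eq, PySem.Str.len_eq] at h1
    omega
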